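-- pv_equiv track=rewrite | github.com/oscarjimenez05/juniorseminar | source/crypto/xor_lh_breaker.py | lehmer_to_permutation
-- ===== SOURCE A (Python) =====
-- import math
--
-- def lehmer_to_permutation(lehmer_code, w):
--     """
--     Decodes a Lehmer integer into a list of indices representing the
--     relative rank of each element in the window.
--
--     Returns a list 'perm' where perm[i] is the rank of window[i].
--     Example: if window is [10, 5, 20], ranks are [1, 0, 2].
--     Meaning: window[1] < window[0] < window[2].
--     """
--     factoradic = []
--     temp_code = lehmer_code
--     for i in range(w):
--         fact = math.factorial(w - 1 - i)
--         factoradic.append(temp_code // fact)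
--         temp_code %= fact
--
--     # convert factoradic to permutation (Lehmer code logic)
--     available_ranks = list(range(w))
--     ranks = [0] * w
--
--     for i in range(w):
--         # The number 'c_i' means x_i is the (c_i)-th smallest of the remaining numbers
--         pick_index = factoradic[i]
--         ranks[i] = available_ranks.pop(pick_index)
--
--     return ranks
-- ===== SOURCE B (Python) =====
-- def lehmer_to_permutation(lehmer_code, w):
--     """
--     Decodes a Lehmer integer into the list of relative ranks, without ever
--     computing a factorial: the factoradic digits are extracted least
--     significant first by repeated divmod with bases 1..w, and the rank list
--     is built back-to-front (placing a digit d shifts already-placed ranks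
--     >= d up by one), so no 'available' list is popped from.
--     """
--     if w <= 0:
--         return []
--     temp = lehmer_code
--     digits = []  # factoradic digits, least significant first
--     for base in range(1, w + 1):
--         temp, r = divmod(temp, base)
--         digits.append(r)
--     ranks = []
--     for d in digits:  # last window position first
--         ranks = [d] + [x + 1 if x >= d else x for x in ranks]
--     return ranks
-- ===== Notes on version B (the rewrite author's own statement) =====
-- stated objective: alternative
-- what changed: B extracts the factoradic digits least-significant-first by repeated divmod with bases 1..w (never calling factorial) and builds the rank list back-to-front by shifting already-placed ranks, instead of A's per-position factorial computation and pop-from-available-list selection.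
import Mathlib
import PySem

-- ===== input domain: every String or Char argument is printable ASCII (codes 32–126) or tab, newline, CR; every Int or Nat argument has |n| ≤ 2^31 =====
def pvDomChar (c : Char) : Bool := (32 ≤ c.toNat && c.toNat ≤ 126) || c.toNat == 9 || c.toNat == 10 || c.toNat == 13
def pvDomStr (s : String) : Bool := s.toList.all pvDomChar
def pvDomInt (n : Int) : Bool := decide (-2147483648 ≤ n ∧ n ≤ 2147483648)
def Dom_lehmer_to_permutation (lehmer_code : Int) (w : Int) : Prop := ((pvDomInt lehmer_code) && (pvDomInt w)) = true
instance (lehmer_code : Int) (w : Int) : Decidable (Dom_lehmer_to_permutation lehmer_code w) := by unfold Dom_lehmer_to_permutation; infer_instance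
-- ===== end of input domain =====

-- B extracts factoradic digits by repeated divmod (no factorials) and builds ranks
-- back-to-front with shifts instead of A's pop-from-available-list; equal wherever A returns.

-- ===== PORT A =====
-- first loop: for i in range(w): fact = factorial(w-1-i); factoradic.append(temp//fact); temp %= fact
def pvALoop1 (w : Int) : List Int → List Int × Int → List Int × Int
  | [], st => st
  | i :: is, (facc, temp) =>
      let fact : Int := ((w - 1 - i).toNat.factorial : Int)
      pvALoop1 w is (facc ++ [PySem.Int.floordiv temp fact], PySem.Int.mod temp fact)

-- second loop: for i in range(w): pick = factoradic[i]; ranks[i] = available.pop(pick)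
def pvALoop2 (factoradic : List Int) : List Int → List Int × List Int → List Int × List Int
  | [], st => st
  | i :: is, (ranks, avail) =>
      let pick := (PySem.List.pyGet? factoradic i).getD 0   -- i ∈ range(w), len factoradic = w: always in range
      match PySem.List.pop? avail pick with
      | some (v, rest) => pvALoop2 factoradic is (PySem.List.pySetD ranks i v, rest)
      | none => pvALoop2 factoradic is (ranks, avail)       -- Python raises IndexError here; excluded by Pre_

def lehmer_to_permutation (lehmer_code : Int) (w : Int) : List Int :=
  let factoradic := (pvALoop1 w (PySem.List.pyRange 0 w 1) ([], lehmer_code)).1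
  (pvALoop2 factoradic (PySem.List.pyRange 0 w 1)
      (List.replicate w.toNat (0 : Int), PySem.List.pyRange 0 w 1)).1

-- ===== PORT B =====
-- for base in range(1, w+1): temp, r = divmod(temp, base); digits.append(r)
def pvBDigits : List Int → Int × List Int → Int × List Int
  | [], st => st
  | base :: bs, (temp, ds) =>
      pvBDigits bs (PySem.Int.floordiv temp base, ds ++ [PySem.Int.mod temp base])

-- for d in digits: ranks = [d] + [x + 1 if x >= d else x for x in ranks]
def pvBBuild : List Int → List Int → List Int
  | [], ranks => ranks
  | d :: ds, ranks => pvBBuild ds (d :: ranks.map (fun x => if x ≥ d then x + 1 else x))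

def lehmer_to_permutation_alt (lehmer_code : Int) (w : Int) : List Int :=
  if w ≤ 0 then []
  else
    let digits := (pvBDigits (PySem.List.pyRange 1 (w + 1) 1) (lehmer_code, [])).2
    pvBBuild digits []

-- ===== PRECONDITION & SPEC =====
-- b * (b+1) * … * (b+k-1)
def pvProdI : Int → Nat → Int
  | _, 0 => 1
  | b, k + 1 => b * pvProdI (b + 1) k

theorem pvProdI_pos (b : Int) (k : Nat) (hb : 0 < b) : 0 < pvProdI b k := by
  induction k generalizing b with
  | zero => simp [pvProdI]
  | succ k ih => exact mul_pos hb (ih (b + 1) (by omega))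

theorem pvProdI_succ_right (b : Int) (k : Nat) : pvProdI b (k + 1) = pvProdI b k * (b + k) := by
  induction k generalizing b with
  | zero => simp [pvProdI]
  | succ k ih =>
      have := ih (b + 1)
      simp only [pvProdI] at *
      rw [this]; push_cast; ring

theorem pvProdI_one_factorial (n : Nat) : pvProdI 1 n = (n.factorial : Int) := by
  induction n with
  | zero => simp [pvProdI, Nat.factorial]
  | succ n ih =>
      rw [pvProdI_succ_right, ih, Nat.factorial_succ]
      push_cast; ring

-- early-exit decision of 'c < acc * (i+1) * … * (i+r)': stops once the product exceeds c,
-- so deciding Pre_ is fast even for huge w (it never computes the full factorial).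
def pvLtFact (c : Int) : Nat → Nat → Int → Bool
  | 0, _, acc => decide (c < acc)
  | r + 1, i, acc => if c < acc then true else pvLtFact c r (i + 1) (acc * ((i : Int) + 1))

theorem pvLtFact_iff (c : Int) (r : Nat) : ∀ (i : Nat) (acc : Int), 0 < acc →
    (pvLtFact c r i acc = true ↔ c < acc * pvProdI ((i : Int) + 1) r) := by
  induction r with
  | zero => intro i acc _; simp [pvLtFact, pvProdI]
  | succ r ih =>
      intro i acc hacc
      have hpos : 0 < pvProdI ((i : Int) + 1) (r + 1) := pvProdI_pos _ _ (by omega)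
      simp only [pvLtFact]
      by_cases h : c < acc
      · simp only [if_pos h, true_iff]
        nlinarith
      · rw [if_neg h, ih (i + 1) (acc * ((i : Int) + 1)) (by positivity)]
        rw [show pvProdI ((i : Int) + 1) (r + 1) = ((i : Int) + 1) * pvProdI ((i : Int) + 1 + 1) r from rfl]
        constructor <;> intro <;> push_cast at * <;> nlinarith [pvProdI_pos ((i : Int) + 1 + 1) r (by omega)]

theorem pvLtFact_factorial (c : Int) (n : Nat) :
    (pvLtFact c n 0 1 = true ↔ c < (n.factorial : Int)) := by
  rw [pvLtFact_iff c n 0 1 one_pos]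
  norm_num [pvProdI_one_factorial]

-- Pre_ is exactly the set of inputs on which A returns: for w > 0, A raises IndexError
-- (list.pop index out of range) precisely when lehmer_code ∉ [-w!, w!); nothing else is excluded.
def Pre_lehmer_to_permutation (lehmer_code : Int) (w : Int) : Prop :=
  w ≤ 0 ∨ (-(w.toNat.factorial : Int) ≤ lehmer_code ∧ lehmer_code < (w.toNat.factorial : Int))
instance (lehmer_code : Int) (w : Int) : Decidable (Pre_lehmer_to_permutation lehmer_code w) :=
  decidable_of_iff
    (w ≤ 0 ∨ (pvLtFact (-lehmer_code - 1) w.toNat 0 1 = true ∧ pvLtFact lehmer_code w.toNat 0 1 = true))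
    (by unfold Pre_lehmer_to_permutation
        rw [pvLtFact_factorial, pvLtFact_factorial]
        omega)
def pvWitness_lehmer_to_permutation : Int × Int := (5, 3)

def Spec_lehmer_to_permutation (lehmer_code : Int) (w : Int) (out : List Int) : Prop := out = lehmer_to_permutation_alt lehmer_code w
instance (lehmer_code : Int) (w : Int) (out : List Int) : Decidable (Spec_lehmer_to_permutation lehmer_code w out) := by unfold Spec_lehmer_to_permutation; infer_instance

-- ===== CLAIM (what is proved, stated in full; the proofs are below) =====
def Claim_equal_lehmer_to_permutation : Prop := ∀ (lehmer_code : Int) (w : Int), Dom_lehmer_to_permutation lehmer_code w → Pre_lehmer_to_permutation lehmer_code w → Spec_lehmer_to_permutation lehmer_code w (lehmer_to_permutation lehmer_code w)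
-- ===== LEMMAS AND PROOFS =====

-- Reference: factoradic digits, most significant first.
def pvMsb : Nat → Int → List Int
  | 0, _ => []
  | n + 1, c => PySem.Int.floordiv c (n.factorial : Int) :: pvMsb n (PySem.Int.mod c (n.factorial : Int))

-- Reference: factoradic digits, least significant first, starting at base b.
def pvLsb : Int → Nat → Int → List Int
  | _, 0, _ => []
  | b, k + 1, c => PySem.Int.mod c b :: pvLsb (b + 1) k (PySem.Int.floordiv c b)

-- Reference: A's selection loop, recursively (the none branch is never hit under Pre_).
def pvPopDec : List Int → List Int → List Int
  | _, [] => []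
  | avail, d :: ds =>
      match PySem.List.pop? avail d with
      | some (v, rest) => v :: pvPopDec rest ds
      | none => 0 :: pvPopDec avail ds

-- Reference: B's back-to-front build, as msb-first recursion.
def pvDecM : List Int → List Int
  | [] => []
  | d :: ds => d :: (pvDecM ds).map (fun x => if x ≥ d then x + 1 else x)

theorem pvMsb_length (n : Nat) (c : Int) : (pvMsb n c).length = n := by
  induction n generalizing c with
  | zero => rfl
  | succ n ih => simp [pvMsb, ih]

theorem pvALoop1_spec (w : Int) (k : Nat) : ∀ (a : Int) (acc : List Int) (t : Int),
    a + k = w →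
    (pvALoop1 w (PySem.List.pyRange a w 1) (acc, t)).1 = acc ++ pvMsb k t := by
  induction k with
  | zero =>
      intro a acc t h
      rw [PySem.List.pyRange_one_eq_nil (by omega)]
      simp [pvALoop1, pvMsb]
  | succ k ih =>
      intro a acc t h
      rw [PySem.List.pyRange_one_cons (by omega)]
      have hw : w - 1 - a = (k : Int) := by omega
      simp only [pvALoop1, hw, Int.toNat_natCast]
      rw [ih (a + 1) _ _ (by omega)]
      simp [pvMsb]

theorem pvLsb_spec (w : Int) (k : Nat) : ∀ (b : Int) (acc : List Int) (t : Int),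
    b + k = w + 1 →
    (pvBDigits (PySem.List.pyRange b (w + 1) 1) (t, acc)).2 = acc ++ pvLsb b k t := by
  induction k with
  | zero =>
      intro b acc t h
      rw [PySem.List.pyRange_one_eq_nil (by omega)]
      simp [pvBDigits, pvLsb]
  | succ k ih =>
      intro b acc t h
      rw [PySem.List.pyRange_one_cons (by omega)]
      simp only [pvBDigits]
      rw [ih (b + 1) _ _ (by omega)]
      simp [pvLsb]

theorem pvSet_append (pre : List Int) (x : Int) (rest : List Int) (v : Int) :
    (pre ++ x :: rest).set pre.length v = pre ++ v :: rest := by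
  induction pre with
  | nil => rfl
  | cons p ps ih => simp [ih]

theorem pvALoop2_spec (ds : List Int) (k : Nat) : ∀ (pre avail : List Int),
    pre.length + k = ds.length →
    (pvALoop2 ds (PySem.List.pyRange (pre.length : Int) (ds.length : Int) 1)
        (pre ++ List.replicate k 0, avail)).1 = pre ++ pvPopDec avail (ds.drop pre.length) := by
  induction k with
  | zero =>
      intro pre avail h
      rw [PySem.List.pyRange_one_eq_nil (by omega)]
      rw [List.drop_eq_nil_of_le (by omega : ds.length ≤ pre.length)]
      simp [pvALoop2, pvPopDec]
  | succ k ih =>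
      intro pre avail h
      have hlt : pre.length < ds.length := by omega
      rw [PySem.List.pyRange_one_cons (by exact_mod_cast Nat.cast_lt.mpr hlt)]
      have hget : (PySem.List.pyGet? ds (pre.length : Int)).getD 0 = ds[pre.length] := by
        simp [PySem.List.pyGet?_natCast, List.getElem?_eq_getElem hlt]
      have hdrop : ds.drop pre.length = ds[pre.length] :: ds.drop (pre.length + 1) :=
        List.drop_eq_getElem_cons hlt
      simp only [pvALoop2, hget]
      cases hp : PySem.List.pop? avail ds[pre.length] with
      | some vr =>
          obtain ⟨v, rest⟩ := vr
          dsimp only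
          have hset : PySem.List.pySetD (pre ++ List.replicate (k + 1) 0) (pre.length : Int) v
              = pre ++ v :: List.replicate k 0 := by
            rw [PySem.List.pySetD_natCast]
            rw [show List.replicate (k + 1) (0 : Int) = 0 :: List.replicate k 0 from rfl]
            exact pvSet_append pre 0 (List.replicate k 0) v
          rw [hset]
          have := ih (pre ++ [v]) rest (by simp; omega)
          simp only [List.length_append, List.length_cons, List.length_nil] at this
          rw [show pre ++ v :: List.replicate k (0 : Int) = (pre ++ [v]) ++ List.replicate k 0 by simp,
              show ((pre.length : Int) + 1) = ((pre.length + 1 : Nat) : Int) by push_cast; ring,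
              this]
          rw [hdrop]
          simp [pvPopDec, hp]
      | none =>
          dsimp only
          have := ih (pre ++ [0]) avail (by simp; omega)
          simp only [List.length_append, List.length_cons, List.length_nil] at this
          rw [show pre ++ List.replicate (k+1) (0 : Int) = (pre ++ [0]) ++ List.replicate k 0 by
                simp [List.replicate_succ],
              show ((pre.length : Int) + 1) = ((pre.length + 1 : Nat) : Int) by push_cast; ring,
              this]
          rw [hdrop]
          simp [pvPopDec, hp]

theorem pvBBuild_decM (ds : List Int) : ∀ es : List Int,
    pvBBuild ds (pvDecM es) = pvDecM (ds.reverse ++ es) := by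
  induction ds with
  | nil => intro es; simp [pvBBuild]
  | cons d ds ih =>
      intro es
      have : (d :: (pvDecM es).map (fun x => if x ≥ d then x + 1 else x)) = pvDecM (d :: es) := rfl
      simp only [pvBBuild, this, ih (d :: es)]
      simp

-- the three floor-division identities used to peel the most significant digit off the lsb chain
theorem pvDiv_identities (c b P : Int) (hb : 0 < b) (hP : 0 < P) :
    PySem.Int.mod (PySem.Int.mod c (b * P)) b = PySem.Int.mod c b ∧
    PySem.Int.floordiv (PySem.Int.mod c (b * P)) b = PySem.Int.mod (PySem.Int.floordiv c b) P ∧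
    PySem.Int.floordiv (PySem.Int.floordiv c b) P = PySem.Int.floordiv c (b * P) := by
  have hbP : 0 < b * P := mul_pos hb hP
  simp only [PySem.Int.mod_eq_emod_of_pos hbP, PySem.Int.mod_eq_emod_of_pos hb,
      PySem.Int.mod_eq_emod_of_pos hP,
      PySem.Int.floordiv_eq_ediv_of_pos hb,
      PySem.Int.floordiv_eq_ediv_of_pos hP, PySem.Int.floordiv_eq_ediv_of_pos hbP]
  refine ⟨Int.emod_emod_of_dvd c ⟨P, rfl⟩, ?_, ?_⟩
  · -- (c % (b*P)) / b = (c / b) % P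
    have hq : c % (b * P) = c - b * P * (c / (b * P)) := Int.emod_def c (b * P)
    have h1 : (c - b * P * (c / (b * P))) / b = c / b - P * (c / (b * P)) := by
      rw [show c - b * P * (c / (b * P)) = c + (-(P * (c / (b * P)))) * b by ring]
      rw [Int.add_mul_ediv_right _ _ (by omega)]
      ring
    rw [hq, h1, Int.emod_def (c / b) P, Int.ediv_ediv_of_nonneg (le_of_lt hb) (x := c)]
  · exact Int.ediv_ediv_of_nonneg (le_of_lt hb) (x := c)

theorem pvLsb_snoc (k : Nat) : ∀ (b c : Int), 0 < b → 0 ≤ c → c < pvProdI b (k + 1) →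
    pvLsb b (k + 1) c
      = pvLsb b k (PySem.Int.mod c (pvProdI b k)) ++ [PySem.Int.floordiv c (pvProdI b k)] := by
  induction k with
  | zero =>
      intro b c hb h0 hc
      have hc' : c < b := by simpa [pvProdI] using hc
      show [PySem.Int.mod c b] = [] ++ [PySem.Int.floordiv c (pvProdI b 0)]
      rw [PySem.Int.mod_eq_emod_of_pos hb, Int.emod_eq_of_lt h0 hc']
      simp [pvProdI, PySem.Int.floordiv, Int.fdiv_one]
  | succ k ih =>
      intro b c hb h0 hc
      have hP' : 0 < pvProdI (b + 1) k := pvProdI_pos _ _ (by omega)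
      have hmul : pvProdI b (k + 1) = b * pvProdI (b + 1) k := rfl
      obtain ⟨hi1, hi2, hi3⟩ := pvDiv_identities c b (pvProdI (b + 1) k) hb hP'
      have hq0 : 0 ≤ PySem.Int.floordiv c b := by
        rw [PySem.Int.floordiv_eq_ediv_of_pos hb]; exact Int.ediv_nonneg h0 (by omega)
      have hqlt : PySem.Int.floordiv c b < pvProdI (b + 1) (k + 1) := by
        rw [PySem.Int.floordiv_lt_iff_lt_mul hb]
        calc c < pvProdI b (k + 2) := hc
          _ = pvProdI (b + 1) (k + 1) * b := by
              rw [show pvProdI b (k + 2) = b * pvProdI (b + 1) (k + 1) from rfl]; ring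
      have step : pvLsb b (k + 2) c
          = PySem.Int.mod c b :: pvLsb (b + 1) (k + 1) (PySem.Int.floordiv c b) := rfl
      rw [step, ih (b + 1) _ (by omega) hq0 hqlt]
      have target : pvLsb b (k + 1) (PySem.Int.mod c (pvProdI b (k + 1)))
          = PySem.Int.mod c b
            :: pvLsb (b + 1) k (PySem.Int.mod (PySem.Int.floordiv c b) (pvProdI (b + 1) k)) := by
        rw [show pvLsb b (k+1) (PySem.Int.mod c (pvProdI b (k+1)))
              = PySem.Int.mod (PySem.Int.mod c (pvProdI b (k+1))) b
                :: pvLsb (b+1) k (PySem.Int.floordiv (PySem.Int.mod c (pvProdI b (k+1))) b) from rfl]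
        rw [hmul, hi1, hi2]
      rw [target, hmul, hi3]
      simp

theorem pvLsb_shift (k : Nat) : ∀ (b c : Int), 0 < b →
    pvLsb b k (c + pvProdI b k) = pvLsb b k c := by
  induction k with
  | zero => intro b c _; rfl
  | succ k ih =>
      intro b c hb
      have hmul : pvProdI b (k + 1) = b * pvProdI (b + 1) k := rfl
      simp only [pvLsb, hmul]
      congr 1
      · rw [PySem.Int.mod_eq_emod_of_pos hb, PySem.Int.mod_eq_emod_of_pos hb]
        rw [show c + b * pvProdI (b + 1) k = c + b * pvProdI (b + 1) k from rfl]
        apply Int.add_mul_emod_self_left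
      · rw [PySem.Int.floordiv_eq_ediv_of_pos hb, PySem.Int.floordiv_eq_ediv_of_pos hb]
        rw [Int.add_mul_ediv_left c _ (by omega : b ≠ 0)]
        rw [← PySem.Int.floordiv_eq_ediv_of_pos hb (a := c)]
        exact ih (b + 1) _ (by omega)

theorem pvLsb_reverse (n : Nat) : ∀ c : Int, 0 ≤ c → c < (n.factorial : Int) →
    (pvLsb 1 n c).reverse = pvMsb n c := by
  induction n with
  | zero => intro c _ _; rfl
  | succ n ih =>
      intro c h0 hc
      have hfac : pvProdI 1 n = (n.factorial : Int) := pvProdI_one_factorial n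
      have hfac1 : pvProdI 1 (n + 1) = ((n + 1).factorial : Int) := pvProdI_one_factorial (n + 1)
      rw [pvLsb_snoc n 1 c one_pos h0 (by rw [hfac1]; exact_mod_cast hc)]
      rw [List.reverse_append]
      have hnf : (0 : Int) < (n.factorial : Int) := by exact_mod_cast n.factorial_pos
      rw [hfac, ih (PySem.Int.mod c (n.factorial : Int)) (PySem.Int.mod_nonneg _ hnf)
            (PySem.Int.mod_lt _ hnf)]
      rfl

theorem pvEraseIdx_range (n : Nat) (d : Int) (h0 : 0 ≤ d) (hd : d < (n : Int) + 1) :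
    (PySem.List.pyRange 0 ((n : Int) + 1) 1).eraseIdx d.toNat
      = (PySem.List.pyRange 0 (n : Int) 1).map (fun x => if x ≥ d then x + 1 else x) := by
  apply List.ext_getElem
  · simp [List.length_eraseIdx, PySem.List.length_pyRange_one]
    omega
  · intro j h1 h2
    have hj : (j : Int) < (n : Int) := by
      simp [PySem.List.length_pyRange_one] at h2; omega
    have hjn : j < ((n : Int) + 1 - 0).toNat := by simp; omega
    rw [List.getElem_eraseIdx]
    simp only [List.getElem_map, PySem.List.getElem_pyRange_one]
    split_ifs <;> push_cast <;> omega

theorem pvPopDec_msb (n : Nat) : ∀ (g : Int → Int) (c : Int), 0 ≤ c → c < (n.factorial : Int) →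
    pvPopDec ((PySem.List.pyRange 0 (n : Int) 1).map g) (pvMsb n c)
      = (pvDecM (pvMsb n c)).map g := by
  induction n with
  | zero => intro g c _ _; rfl
  | succ n ih =>
      intro g c h0 hc
      have hnf : (0 : Int) < (n.factorial : Int) := by exact_mod_cast n.factorial_pos
      have hd0 : 0 ≤ PySem.Int.floordiv c (n.factorial : Int) := by
        rw [PySem.Int.floordiv_eq_ediv_of_pos hnf]; exact Int.ediv_nonneg h0 (by omega)
      have hdlt : PySem.Int.floordiv c (n.factorial : Int) < (n : Int) + 1 := by
        rw [PySem.Int.floordiv_lt_iff_lt_mul hnf]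
        calc c < ((n + 1).factorial : Int) := hc
          _ = ((n : Int) + 1) * (n.factorial : Int) := by
              rw [Nat.factorial_succ]; push_cast; ring
      obtain ⟨k, hk⟩ : ∃ k : Nat, PySem.Int.floordiv c (n.factorial : Int) = (k : Int) :=
        ⟨_, (Int.toNat_of_nonneg hd0).symm⟩
      have hkn : k < n + 1 := by omega
      have hmsb : pvMsb (n + 1) c = (k : Int) :: pvMsb n (PySem.Int.mod c (n.factorial : Int)) := by
        rw [show pvMsb (n + 1) c = PySem.Int.floordiv c (n.factorial : Int)
              :: pvMsb n (PySem.Int.mod c (n.factorial : Int)) from rfl, hk]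
      have hlen : k < ((PySem.List.pyRange 0 (((n : Nat) + 1 : Nat) : Int) 1).map g).length := by
        simp [PySem.List.length_pyRange_one]; omega
      have hpop : PySem.List.pop? ((PySem.List.pyRange 0 (((n : Nat) + 1 : Nat) : Int) 1).map g) (k : Int)
          = some (g (k : Int), ((PySem.List.pyRange 0 (n : Int) 1).map
              (fun x => if x ≥ (k : Int) then x + 1 else x)).map g) := by
        rw [PySem.List.pop?_natCast _ _ hlen]
        have e1 : ((PySem.List.pyRange 0 (((n : Nat) + 1 : Nat) : Int) 1).map g)[k] = g (k : Int) := by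
          simp only [List.getElem_map]
          rw [PySem.List.getElem_pyRange_one]
          norm_num
        have e2 : ((PySem.List.pyRange 0 (((n : Nat) + 1 : Nat) : Int) 1).map g).eraseIdx k
            = ((PySem.List.pyRange 0 (n : Int) 1).map
                (fun x => if x ≥ (k : Int) then x + 1 else x)).map g := by
          rw [List.eraseIdx_map]
          rw [show (PySem.List.pyRange 0 (((n : Nat) + 1 : Nat) : Int) 1).eraseIdx k
                = (PySem.List.pyRange 0 ((n : Int) + 1) 1).eraseIdx ((k : Int)).toNat by
              norm_num]
          rw [pvEraseIdx_range n (k : Int) (by omega) (by exact_mod_cast hkn)]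
        rw [e1, e2]
      rw [hmsb]
      have hrange : ((((n : Nat) + 1 : Nat) : Int)) = (n : Int) + 1 := by push_cast; ring
      simp only [pvPopDec, hpop]
      have ih' := ih (g ∘ fun x => if x ≥ (k : Int) then x + 1 else x)
          (PySem.Int.mod c (n.factorial : Int)) (PySem.Int.mod_nonneg _ hnf) (PySem.Int.mod_lt _ hnf)
      rw [List.map_map, ih']
      rw [show pvDecM ((k : Int) :: pvMsb n (PySem.Int.mod c (n.factorial : Int)))
            = (k : Int) :: (pvDecM (pvMsb n (PySem.Int.mod c (n.factorial : Int)))).map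
                (fun x => if x ≥ (k : Int) then x + 1 else x) from rfl]
      simp [List.map_map]

theorem pvPop_neg_shift {α : Type} (xs : List α) (i : Int)
    (h1 : -(xs.length : Int) ≤ i) (h2 : i < 0) :
    PySem.List.pop? xs i = PySem.List.pop? xs (i + xs.length) := by
  have : PySem.List.pyIdx? xs.length i = PySem.List.pyIdx? xs.length (i + xs.length) := by
    simp only [PySem.List.pyIdx?]
    split_ifs <;> first | (congr 1; omega) | omega
  simp [PySem.List.pop?, this]

theorem pvMsb_shift (n : Nat) (c : Int) (hn : 0 < n) :
    pvMsb n (c + (n.factorial : Int))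
      = (PySem.Int.floordiv c ((n - 1).factorial : Int) + n)
        :: pvMsb (n - 1) (PySem.Int.mod c ((n - 1).factorial : Int)) := by
  obtain ⟨m, rfl⟩ : ∃ m, n = m + 1 := ⟨n - 1, by omega⟩
  have hmf : (0 : Int) < (m.factorial : Int) := by exact_mod_cast m.factorial_pos
  have hfs : ((m + 1).factorial : Int) = (m.factorial : Int) * ((m : Int) + 1) := by
    rw [Nat.factorial_succ]; push_cast; ring
  have h1 : PySem.Int.floordiv (c + ((m + 1).factorial : Int)) (m.factorial : Int)
      = PySem.Int.floordiv c (m.factorial : Int) + ((m : Int) + 1) := by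
    rw [PySem.Int.floordiv_eq_ediv_of_pos hmf, PySem.Int.floordiv_eq_ediv_of_pos hmf, hfs]
    rw [show c + (m.factorial : Int) * ((m : Int) + 1) = c + (m.factorial : Int) * ((m : Int) + 1) from rfl]
    exact Int.add_mul_ediv_left c _ (by omega)
  have h2 : PySem.Int.mod (c + ((m + 1).factorial : Int)) (m.factorial : Int)
      = PySem.Int.mod c (m.factorial : Int) := by
    rw [PySem.Int.mod_eq_emod_of_pos hmf, PySem.Int.mod_eq_emod_of_pos hmf, hfs]
    apply Int.add_mul_emod_self_left
  rw [show pvMsb (m + 1) (c + ((m + 1).factorial : Int))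
        = PySem.Int.floordiv (c + ((m + 1).factorial : Int)) (m.factorial : Int)
          :: pvMsb m (PySem.Int.mod (c + ((m + 1).factorial : Int)) (m.factorial : Int)) from rfl]
  rw [h1, h2]
  simp only [Nat.add_sub_cancel]
  push_cast
  ring_nf

-- A's port, for w > 0, computes the pop-decode of the msb digits.
theorem pvA_eq (c w : Int) (hw : 0 < w) :
    lehmer_to_permutation c w
      = pvPopDec (PySem.List.pyRange 0 (w.toNat : Int) 1) (pvMsb w.toNat c) := by
  have hwn : ((w.toNat : Nat) : Int) = w := by omega
  unfold lehmer_to_permutation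
  have h1 : (pvALoop1 w (PySem.List.pyRange 0 w 1) ([], c)).1 = pvMsb w.toNat c := by
    have := pvALoop1_spec w w.toNat 0 [] c (by omega)
    simpa using this
  rw [h1]
  have h2 := pvALoop2_spec (pvMsb w.toNat c) w.toNat [] (PySem.List.pyRange 0 w 1)
      (by simp [pvMsb_length])
  simp only [List.length_nil, Nat.cast_zero, List.nil_append, List.drop_zero,
    pvMsb_length, hwn] at h2
  simpa [hwn] using h2

-- B's port, for w > 0, computes the shift-decode of the reversed lsb digits.
theorem pvB_eq (c w : Int) (hw : 0 < w) :
    lehmer_to_permutation_alt c w = pvDecM ((pvLsb 1 w.toNat c).reverse) := by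
  unfold lehmer_to_permutation_alt
  rw [if_neg (by omega)]
  have h1 : (pvBDigits (PySem.List.pyRange 1 (w + 1) 1) (c, [])).2 = pvLsb 1 w.toNat c := by
    have := pvLsb_spec w w.toNat 1 [] c (by omega)
    simpa using this
  rw [h1]
  have := pvBBuild_decM (pvLsb 1 w.toNat c) []
  simpa [pvDecM] using this

theorem pvMain (c w : Int) (hw : 0 < w) (h0 : 0 ≤ c) (hc : c < (w.toNat.factorial : Int)) :
    lehmer_to_permutation c w = lehmer_to_permutation_alt c w := by
  rw [pvA_eq c w hw, pvB_eq c w hw]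
  rw [pvLsb_reverse w.toNat c h0 hc]
  have := pvPopDec_msb w.toNat id c h0 hc
  simpa using this

-- ===== VERDICT (by name: the statement is the Claim_ definition above) =====
theorem lehmer_to_permutation_spec : Claim_equal_lehmer_to_permutation := by
  unfold Claim_equal_lehmer_to_permutation
  intro c w _hdom hpre
  unfold Spec_lehmer_to_permutation
  by_cases hle : w ≤ 0
  · unfold lehmer_to_permutation lehmer_to_permutation_alt
    rw [PySem.List.pyRange_one_eq_nil (by omega)]
    simp [pvALoop2, if_pos hle, show w.toNat = 0 by omega]
  · have hw : 0 < w := by omega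
    rcases hpre with h | ⟨h1, h2⟩
    · omega
    by_cases h0 : 0 ≤ c
    · exact pvMain c w hw h0 h2
    · -- negative code: both decode c + w!
      have hn : 0 < w.toNat := by omega
      have hnf : (0 : Int) < (w.toNat.factorial : Int) := by exact_mod_cast w.toNat.factorial_pos
      set F : Int := (w.toNat.factorial : Int) with hF
      have hc0 : 0 ≤ c + F := by omega
      have hcF : c + F < F := by omega
      obtain ⟨m, hm⟩ : ∃ m, w.toNat = m + 1 := ⟨w.toNat - 1, by omega⟩
      have hmf : (0 : Int) < (m.factorial : Int) := by exact_mod_cast m.factorial_pos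
      have hFm : F = ((m : Int) + 1) * (m.factorial : Int) := by
        rw [hF, hm, Nat.factorial_succ]; push_cast; ring
      have hd_lt : PySem.Int.floordiv c (m.factorial : Int) < 0 := by
        rw [PySem.Int.floordiv_lt_iff_lt_mul hmf, zero_mul]; omega
      have hd_ge : -((m : Int) + 1) ≤ PySem.Int.floordiv c (m.factorial : Int) := by
        rw [PySem.Int.le_floordiv_iff_mul_le hmf]
        have : (-((m : Int) + 1)) * (m.factorial : Int) = -F := by rw [hFm]; ring
        omega
      have hB : lehmer_to_permutation_alt c w = lehmer_to_permutation_alt (c + F) w := by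
        rw [pvB_eq c w hw, pvB_eq (c + F) w hw]
        rw [show c + F = c + pvProdI 1 w.toNat by rw [pvProdI_one_factorial]]
        rw [pvLsb_shift w.toNat 1 c one_pos]
      have hA : lehmer_to_permutation c w = lehmer_to_permutation (c + F) w := by
        rw [pvA_eq c w hw, pvA_eq (c + F) w hw]
        have hA1 : pvMsb w.toNat c
            = PySem.Int.floordiv c (m.factorial : Int)
              :: pvMsb m (PySem.Int.mod c (m.factorial : Int)) := by rw [hm]; rfl
        have hA2 : pvMsb w.toNat (c + F)
            = (PySem.Int.floordiv c (m.factorial : Int) + ((m : Int) + 1))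
              :: pvMsb m (PySem.Int.mod c (m.factorial : Int)) := by
          rw [hm, hF]
          have := pvMsb_shift (m + 1) c (by omega)
          simp only [Nat.add_sub_cancel] at this
          rw [show w.toNat.factorial = (m + 1).factorial by rw [hm]]
          rw [this]
          norm_cast
        rw [hA1, hA2]
        simp only [pvPopDec]
        rw [pvPop_neg_shift _ (PySem.Int.floordiv c (m.factorial : Int))
              (by simp [PySem.List.length_pyRange_one]; omega) hd_lt]
        have hlen : (((PySem.List.pyRange 0 ((w.toNat : Nat) : Int) 1).length : Nat) : Int)
            = (m : Int) + 1 := by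
          simp [PySem.List.length_pyRange_one]; omega
        rw [hlen]
      rw [hA, hB]
      exact pvMain (c + F) w hw hc0 hcF
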